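-- pv_equiv track=rewrite | github.com/openmm/openmm | wrappers/python/openmm/app/forcefield.py | _countResidueAtoms
-- ===== SOURCE A (Python) =====
-- def _countResidueAtoms(elements):
--     """Count the number of atoms of each element in a residue."""
--     counts = {}
--     for element in elements:
--         if element in counts:
--             counts[element] += 1
--         else:
--             counts[element] = 1
--     return counts
-- ===== SOURCE B (Python) =====
-- def _countResidueAtoms(elements):
--     """Count the number of atoms of each element in a residue."""
--     return {e: elements.count(e) for e in dict.fromkeys(elements)}
-- ===== Notes on version B (the rewrite author's own statement) =====
-- stated objective: idiomatic
-- what changed: Replaces the single accumulating dict-update pass with a dedup-then-count shape: build the distinct elements in first-occurrence order via dict.fromkeys, then rescan the whole list once per distinct element with list.count in a dict comprehension.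
import Mathlib
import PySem

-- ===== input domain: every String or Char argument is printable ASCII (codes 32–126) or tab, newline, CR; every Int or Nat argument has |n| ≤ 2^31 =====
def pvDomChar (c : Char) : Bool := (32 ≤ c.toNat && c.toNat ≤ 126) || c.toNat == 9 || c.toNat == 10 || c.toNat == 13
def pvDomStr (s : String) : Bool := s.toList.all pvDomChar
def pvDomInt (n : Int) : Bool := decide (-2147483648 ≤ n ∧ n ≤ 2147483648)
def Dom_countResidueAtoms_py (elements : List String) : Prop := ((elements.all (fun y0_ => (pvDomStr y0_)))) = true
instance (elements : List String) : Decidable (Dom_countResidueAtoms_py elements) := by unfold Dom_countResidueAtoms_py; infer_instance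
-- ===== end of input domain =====

-- B replaces A's single accumulating dict-update pass with dedup-then-count (one rescan per distinct element); objective: more idiomatic.


-- ===== PORT A =====
-- counts = {}; for element in elements: if element in counts: counts[element] += 1 else: counts[element] = 1; return counts
def countResidueAtoms_py (elements : List String) : List (String × Int) :=
  (elements.foldl
    (fun counts element =>
      if counts.contains element then counts.modify element 0 (· + 1)
      else counts.insert element 1)
    PySem.Dict.empty).items

-- ===== PORT B =====
-- return {e: elements.count(e) for e in dict.fromkeys(elements)}
def countResidueAtoms_py_alt (elements : List String) : List (String × Int) :=
  (PySem.List.dedup elements).map (fun e => (e, (elements.count e : Int)))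

-- ===== PRECONDITION & SPEC =====
def Spec_countResidueAtoms_py (elements : List String) (out : List (String × Int)) : Prop := out = countResidueAtoms_py_alt elements
instance (elements : List String) (out : List (String × Int)) : Decidable (Spec_countResidueAtoms_py elements out) := by unfold Spec_countResidueAtoms_py; infer_instance

-- ===== CLAIM (what is proved, stated in full; the proofs are below) =====
def Claim_equal_countResidueAtoms_py : Prop := ∀ (elements : List String), Dom_countResidueAtoms_py elements → Spec_countResidueAtoms_py elements (countResidueAtoms_py elements)

-- ===== LEMMAS AND PROOFS =====

-- A's two branches are one Counter step: when the key is absent, modify with default 0 inserts value 0+1=1.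
theorem countStep_eq_modify (d : PySem.Dict String Int) (x : String) :
    (if d.contains x then d.modify x 0 (· + 1) else d.insert x 1) = d.modify x 0 (· + 1) := by
  by_cases h : d.contains x
  · simp [h]
  · have hc : d.contains x = false := by simpa using h
    have hg : d.getD x 0 = 0 := by simp [PySem.Dict.getD_of_not_contains, hc]
    simp [hc, PySem.Dict.insert, PySem.Dict.modify, hg]

-- ===== VERDICT (by name: the statement is the Claim_ definition above) =====
theorem countResidueAtoms_py_spec : Claim_equal_countResidueAtoms_py := by
  intro elements _
  unfold Spec_countResidueAtoms_py countResidueAtoms_py countResidueAtoms_py_alt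
  have hfold : elements.foldl
      (fun counts element =>
        if counts.contains element then counts.modify element 0 (· + 1)
        else counts.insert element 1)
      PySem.Dict.empty
      = PySem.Dict.counter elements := by
    rw [PySem.Dict.counter_eq_foldl]
    congr 1
    funext d x
    exact countStep_eq_modify d x
  rw [hfold, PySem.Dict.items_counter]
  simp
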